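-- pv_equiv track=rewrite | github.com/cfevrius/CodingBat | source/recursion1.py | count_hi2
-- ===== SOURCE A (Python) =====
-- def count_hi2(str):
--     """Given a string, compute recursively the number of times lowercase "hi" appears in the string,
--     however do not count "hi" that have an 'x' immedately before them.
--     """
--     if str == "":
--         return 0
--     elif len(str) >= 3 and str[0:3] == 'xhi':
--         return count_hi2(str[3:])
--     elif len(str) >= 2 and str[0:2] == 'hi':
--         return 1 + count_hi2(str[2:])
--     else:
--         return count_hi2(str[1:])
-- ===== SOURCE B (Python) =====
-- def count_hi2(str):
--     # Count positions where "hi" occurs whose preceding character is not 'x':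
--     # pair each "hi" candidate with its predecessor (a space sentinel for position 0).
--     return sum(1 for p, a, b in zip(' ' + str, str, str[1:])
--                if p != 'x' and a == 'h' and b == 'i')
-- ===== Notes on version B (the rewrite author's own statement) =====
-- stated objective: faster
-- what changed: Replaced the recursive skip/count/advance scan with a stateless position-based filter: zip the string with its predecessor and successor characters and count the (prev, 'h', 'i') triples whose prev is not 'x'.
import Mathlib
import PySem

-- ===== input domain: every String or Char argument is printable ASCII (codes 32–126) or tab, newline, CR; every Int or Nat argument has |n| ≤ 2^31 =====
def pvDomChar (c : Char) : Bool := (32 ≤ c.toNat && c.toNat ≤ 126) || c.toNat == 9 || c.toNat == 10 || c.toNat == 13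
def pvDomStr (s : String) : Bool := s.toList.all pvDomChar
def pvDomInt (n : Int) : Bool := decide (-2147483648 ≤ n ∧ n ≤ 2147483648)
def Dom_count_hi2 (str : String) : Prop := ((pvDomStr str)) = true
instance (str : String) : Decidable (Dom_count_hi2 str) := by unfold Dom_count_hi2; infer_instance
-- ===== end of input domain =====

-- B replaces A's recursive skip/count scan by a stateless position filter over zipped (prev, cur, next) triples (objective: faster, asymptotic).


-- ===== PORT A =====
-- A: recursion on the string, branches in A's order: "" → 0, prefix 'xhi' → skip 3,
-- prefix 'hi' → 1 + recurse on the rest, else → recurse on the tail.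
def countHi2A : List Char → Int
  | [] => 0
  | 'x' :: 'h' :: 'i' :: rest => countHi2A rest
  | 'h' :: 'i' :: rest => 1 + countHi2A rest
  | _ :: rest => countHi2A rest

def count_hi2 (str : String) : Int := countHi2A str.toList

-- ===== PORT B =====
-- B: zip (' ' + s, s, s[1:]) and count the triples (p, a, b) with p ≠ 'x', a = 'h', b = 'i'.
def count_hi2_alt (str : String) : Int :=
  let l := str.toList
  ((((' ' :: l).zip (l.zip l.tail)).countP
      (fun t => t.1 != 'x' && t.2.1 == 'h' && t.2.2 == 'i') : Nat) : Int)

-- ===== PRECONDITION & SPEC =====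
def Spec_count_hi2 (str : String) (out : Int) : Prop := out = count_hi2_alt str
instance (str : String) (out : Int) : Decidable (Spec_count_hi2 str out) := by unfold Spec_count_hi2; infer_instance

-- ===== CLAIM =====
def Claim_equal_count_hi2 : Prop := ∀ (str : String), Dom_count_hi2 str → Spec_count_hi2 str (count_hi2 str)

-- ===== LEMMAS AND PROOFS =====
-- B's count, parametrised by the predecessor character of the first position.
def gB (prev : Char) (l : List Char) : Int :=
  (((prev :: l).zip (l.zip l.tail)).countP
      (fun t => t.1 != 'x' && t.2.1 == 'h' && t.2.2 == 'i') : Nat)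

theorem gB_nil (prev : Char) : gB prev [] = 0 := by simp [gB]

theorem gB_one (prev a : Char) : gB prev [a] = 0 := by simp [gB]

theorem gB_cons2 (prev a b : Char) (t : List Char) :
    gB prev (a :: b :: t) =
      (if prev ≠ 'x' ∧ a = 'h' ∧ b = 'i' then 1 else 0) + gB a (b :: t) := by
  simp [gB, List.countP_cons]
  split_ifs with h <;> simp_all <;> omega

theorem cA_i (t : List Char) : countHi2A ('i' :: t) = countHi2A t := by
  rw [countHi2A.eq_4] <;> intro _ h _ <;> simp at h

theorem cA_skip (a : Char) (b : Char) (t : List Char)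
    (hx : ¬(a = 'x' ∧ b = 'h' ∧ ∃ r, t = 'i' :: r)) (hh : ¬(a = 'h' ∧ b = 'i')) :
    countHi2A (a :: b :: t) = countHi2A (b :: t) := by
  rw [countHi2A.eq_4]
  · rintro r h1 h2
    cases h2
    exact hx ⟨h1, rfl, r, rfl⟩
  · rintro r h1 h2
    cases h2
    exact hh ⟨h1, rfl⟩

theorem gB_spec (l : List Char) : ∀ prev : Char,
    gB prev l = if prev = 'x' then countHi2A ('x' :: l) else countHi2A l := by
  induction l with
  | nil =>
      intro prev
      have h1 : countHi2A ['x'] = 0 := by decide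
      simp [gB_nil, countHi2A, h1]
  | cons a l ih =>
      intro prev
      match l with
      | [] =>
          have h1 : ∀ c : Char, countHi2A [c] = 0 := by
            intro c
            rw [countHi2A.eq_4] <;> first
              | rfl
              | (intro r h1 h2; simp at h2)
          have h2 : countHi2A ['x', a] = 0 := by
            rw [countHi2A.eq_4, h1]
            · rintro r _ h2; simp at h2
            · rintro r h; simp at h
          simp [gB_one, h1, h2]
      | b :: t =>
          rw [gB_cons2, ih a]
          by_cases ha : a = 'x'
          · subst ha
            have hxx : countHi2A ('x' :: 'x' :: b :: t) = countHi2A ('x' :: b :: t) := by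
              rw [countHi2A.eq_4]
              · rintro r h1 h2; simp at h2
              · rintro r h; simp at h
            simp [hxx]
          · by_cases hhi : a = 'h' ∧ b = 'i'
            · obtain ⟨rfl, rfl⟩ := hhi
              rw [countHi2A.eq_2, countHi2A.eq_3, cA_i]
              split_ifs with hp <;> simp_all
            · have e1 : countHi2A ('x' :: a :: b :: t) = countHi2A (a :: b :: t) := by
                rw [countHi2A.eq_4]
                · rintro r _ h2
                  cases h2
                  exact hhi ⟨rfl, rfl⟩
                · rintro r h; simp at h
              have e2 : countHi2A (a :: b :: t) = countHi2A (b :: t) := by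
                apply cA_skip
                · rintro ⟨h, _, _⟩; exact ha h
                · exact hhi
              simp [e1, e2, hhi, ha]

-- ===== VERDICT =====
theorem count_hi2_spec : Claim_equal_count_hi2 := by
  intro str _
  unfold Spec_count_hi2 count_hi2 count_hi2_alt
  have h := gB_spec str.toList ' '
  simp [gB] at h
  simp [h]
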